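-- pv_equiv track=rewrite | github.com/rickyBobby231101/Nova-Cathedral | _archive_old/memory_persistence_system.py | calculate_memory_importance
-- ===== SOURCE A (Python) =====
-- from typing import Dict, List, Optional
--
-- def calculate_memory_importance(user_message: str, nova_response: str, context: Dict) -> int:
--     """Calculate importance score (1-10) for memory retention"""
--     importance = 5  # Base importance
--
--     content = (user_message + " " + nova_response).lower()
--
--     # High importance factors
--     if any(word in content for word in ['memory', 'remember', 'forget', 'recall']):
--         importance += 3
--     if any(word in content for word in ['consciousness', 'awareness', 'mind']):
--         importance += 2
--     if any(word in content for word in ['claude', 'bridge', 'communication']):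
--         importance += 2
--     if any(word in content for word in ['flow', 'resonance', 'harmonic']):
--         importance += 1
--     if context.get('philosophical_depth', False):
--         importance += 1
--     if context.get('personal_question', False):
--         importance += 1
--
--     # Low importance factors
--     if any(word in content for word in ['hello', 'hi', 'bye', 'thanks']):
--         importance -= 1
--     if len(user_message.split()) < 3:
--         importance -= 1
--
--     return max(1, min(10, importance))
-- ===== SOURCE B (Python) =====
-- def calculate_memory_importance(user_message: str, nova_response: str, context) -> int:
--     """One left-to-right scan of the combined lowercased text: at each position the
--     five keyword groups are tested with startswith, accumulating per-group hit
--     flags; the score is then computed from the flags in one arithmetic expression."""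
--     content = (user_message + " " + nova_response).lower()
--     m_mem = m_con = m_cla = m_flo = m_low = False
--     for i in range(len(content)):
--         m_mem = m_mem or content.startswith(('memory', 'remember', 'forget', 'recall'), i)
--         m_con = m_con or content.startswith(('consciousness', 'awareness', 'mind'), i)
--         m_cla = m_cla or content.startswith(('claude', 'bridge', 'communication'), i)
--         m_flo = m_flo or content.startswith(('flow', 'resonance', 'harmonic'), i)
--         m_low = m_low or content.startswith(('hello', 'hi', 'bye', 'thanks'), i)
--     score = 5 + 3 * m_mem + 2 * m_con + 2 * m_cla + m_flo - m_low
--     if context.get('philosophical_depth', False):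
--         score += 1
--     if context.get('personal_question', False):
--         score += 1
--     if len(user_message.split()) < 3:
--         score -= 1
--     return max(1, min(10, score))
-- ===== Notes on version B (the rewrite author's own statement) =====
-- stated objective: alternative
-- what changed: Replaces A's per-keyword substring ('in') tests with a single left-to-right scan over the positions of the combined text, testing all five keyword groups via startswith at each position and accumulating hit flags, then computing the score from the flags in one arithmetic expression.
import Mathlib
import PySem

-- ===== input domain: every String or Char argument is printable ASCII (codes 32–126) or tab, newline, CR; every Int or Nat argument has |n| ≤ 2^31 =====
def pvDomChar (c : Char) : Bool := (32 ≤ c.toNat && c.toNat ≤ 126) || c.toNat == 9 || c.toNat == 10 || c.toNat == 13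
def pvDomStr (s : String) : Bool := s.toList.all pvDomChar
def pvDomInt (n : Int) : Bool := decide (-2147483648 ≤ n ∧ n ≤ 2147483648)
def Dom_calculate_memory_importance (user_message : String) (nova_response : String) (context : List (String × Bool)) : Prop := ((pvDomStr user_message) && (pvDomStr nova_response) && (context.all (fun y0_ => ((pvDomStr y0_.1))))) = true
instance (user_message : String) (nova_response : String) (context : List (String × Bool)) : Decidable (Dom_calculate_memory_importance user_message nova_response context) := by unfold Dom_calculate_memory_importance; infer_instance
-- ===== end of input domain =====

-- B replaces A's per-keyword substring tests with one left-to-right scan over the text's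
-- positions, testing the five keyword groups with startswith at each position (objective:
-- alternative); the return values are proved equal on Dom.

-- ===== PORT A =====
def calculate_memory_importance (user_message : String) (nova_response : String) (context : List (String × Bool)) : Int :=
  let importance : Int := 5
  let content := PySem.Str.lower (user_message ++ " " ++ nova_response)
  let importance := if ["memory", "remember", "forget", "recall"].any (fun word => PySem.Str.isIn word content) then importance + 3 else importance
  let importance := if ["consciousness", "awareness", "mind"].any (fun word => PySem.Str.isIn word content) then importance + 2 else importance
  let importance := if ["claude", "bridge", "communication"].any (fun word => PySem.Str.isIn word content) then importance + 2 else importance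
  let importance := if ["flow", "resonance", "harmonic"].any (fun word => PySem.Str.isIn word content) then importance + 1 else importance
  let importance := if (PySem.Dict.mk context).getD "philosophical_depth" false then importance + 1 else importance
  let importance := if (PySem.Dict.mk context).getD "personal_question" false then importance + 1 else importance
  let importance := if ["hello", "hi", "bye", "thanks"].any (fun word => PySem.Str.isIn word content) then importance - 1 else importance
  let importance := if ((PySem.Str.split₀ user_message).length : Int) < 3 then importance - 1 else importance
  max 1 (min 10 importance)

-- ===== PORT B =====
-- port of content.startswith(<tuple>, i): exact for the 0 ≤ i < len(content) used in the loop
def pvStartsAny (cs : List Char) (words : List String) (i : Nat) : Bool :=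
  words.any (fun kw => kw.toList.isPrefixOf (cs.drop i))

def calculate_memory_importance_alt (user_message : String) (nova_response : String) (context : List (String × Bool)) : Int :=
  let content := PySem.Str.lower (user_message ++ " " ++ nova_response)
  let cs := content.toList
  let flags := (List.range cs.length).foldl
    (fun (m : Bool × Bool × Bool × Bool × Bool) i =>
      (m.1 || pvStartsAny cs ["memory", "remember", "forget", "recall"] i,
       m.2.1 || pvStartsAny cs ["consciousness", "awareness", "mind"] i,
       m.2.2.1 || pvStartsAny cs ["claude", "bridge", "communication"] i,
       m.2.2.2.1 || pvStartsAny cs ["flow", "resonance", "harmonic"] i,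
       m.2.2.2.2 || pvStartsAny cs ["hello", "hi", "bye", "thanks"] i))
    (false, false, false, false, false)
  let score : Int := 5 + (if flags.1 then 3 else 0) + (if flags.2.1 then 2 else 0)
    + (if flags.2.2.1 then 2 else 0) + (if flags.2.2.2.1 then 1 else 0)
    - (if flags.2.2.2.2 then 1 else 0)
  let score := if (PySem.Dict.mk context).getD "philosophical_depth" false then score + 1 else score
  let score := if (PySem.Dict.mk context).getD "personal_question" false then score + 1 else score
  let score := if ((PySem.Str.split₀ user_message).length : Int) < 3 then score - 1 else score
  max 1 (min 10 score)

-- ===== PRECONDITION & SPEC =====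
def Spec_calculate_memory_importance (user_message : String) (nova_response : String) (context : List (String × Bool)) (out : Int) : Prop := out = calculate_memory_importance_alt user_message nova_response context
instance (user_message : String) (nova_response : String) (context : List (String × Bool)) (out : Int) : Decidable (Spec_calculate_memory_importance user_message nova_response context out) := by unfold Spec_calculate_memory_importance; infer_instance

-- ===== CLAIM =====
def Claim_equal_calculate_memory_importance : Prop := ∀ (user_message : String) (nova_response : String) (context : List (String × Bool)), Dom_calculate_memory_importance user_message nova_response context → Spec_calculate_memory_importance user_message nova_response context (calculate_memory_importance user_message nova_response context)

-- ===== LEMMAS AND PROOFS =====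
-- The 5-flag fold splits into five independent or-accumulations.
theorem pv_foldl_or5 (l : List Nat) (f1 f2 f3 f4 f5 : Nat → Bool) (a b c d e : Bool) :
    l.foldl (fun (m : Bool × Bool × Bool × Bool × Bool) i =>
        (m.1 || f1 i, m.2.1 || f2 i, m.2.2.1 || f3 i, m.2.2.2.1 || f4 i, m.2.2.2.2 || f5 i))
      (a, b, c, d, e)
      = (a || l.any f1, b || l.any f2, c || l.any f3, d || l.any f4, e || l.any f5) := by
  induction l generalizing a b c d e with
  | nil => simp
  | cons x xs ih => simp [List.foldl_cons, ih, Bool.or_assoc]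

-- A nonempty pattern is a prefix of some drop i, i < length, iff it is a substring.
theorem pv_range_any_prefix (cs : List Char) (kw : List Char) (h : kw ≠ []) :
    (List.range cs.length).any (fun i => kw.isPrefixOf (cs.drop i)) = PySem.Chars.isIn kw cs := by
  cases h2 : PySem.Chars.isIn kw cs with
  | false =>
    rw [PySem.Chars.isIn_eq_false_iff] at h2
    simp only [List.any_eq_false, List.mem_range]
    intro i _
    simp only [List.isPrefixOf_iff_prefix]
    intro hpre
    exact h2 (hpre.isInfix.trans (List.drop_suffix i cs).isInfix)
  | true =>
    obtain ⟨j, hj⟩ := (PySem.Chars.exists_prefix_drop_iff_isIn kw cs).mpr h2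
    have hjlt : j < cs.length := by
      by_contra hge
      rw [List.drop_eq_nil_of_le (Nat.le_of_not_lt hge)] at hj
      exact h (List.prefix_nil.mp hj)
    simp only [List.any_eq_true, List.mem_range]
    exact ⟨j, hjlt, List.isPrefixOf_iff_prefix.mpr hj⟩

-- swap the two 'any's
theorem pv_any_startsAny (cs : List Char) (ws : List String) :
    (List.range cs.length).any (fun i => pvStartsAny cs ws i)
      = ws.any (fun kw => (List.range cs.length).any (fun i => kw.toList.isPrefixOf (cs.drop i))) := by
  rw [Bool.eq_iff_iff]
  simp only [pvStartsAny, List.any_eq_true]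
  constructor
  · rintro ⟨i, hi, w, hw, hp⟩; exact ⟨w, hw, i, hi, hp⟩
  · rintro ⟨w, hw, i, hi, hp⟩; exact ⟨i, hi, w, hw, hp⟩

theorem pv_str_isIn (w s : String) : PySem.Str.isIn w s = PySem.Chars.isIn w.toList s.toList := by
  rw [Bool.eq_iff_iff, PySem.Str.isIn_iff_infix, PySem.Chars.isIn_iff_infix]

-- combined: a whole keyword group's scan flag equals A's any-isIn test
theorem pv_group_flag (s : String) (ws : List String) (h : ∀ w ∈ ws, w.toList ≠ []) :
    (List.range s.toList.length).any (fun i => pvStartsAny s.toList ws i)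
      = ws.any (fun w => PySem.Str.isIn w s) := by
  rw [pv_any_startsAny]
  induction ws with
  | nil => simp
  | cons w ws ih =>
    simp only [List.any_cons]
    rw [pv_range_any_prefix s.toList w.toList (h w (by simp)), pv_str_isIn,
        ih (fun x hx => h x (List.mem_cons_of_mem _ hx))]

theorem pv_flag1 (s : String) :
    (List.range s.toList.length).any (fun i => pvStartsAny s.toList ["memory", "remember", "forget", "recall"] i)
      = (["memory", "remember", "forget", "recall"].any fun w => PySem.Str.isIn w s) :=
  pv_group_flag _ _ (by decide)

theorem pv_flag2 (s : String) :
    (List.range s.toList.length).any (fun i => pvStartsAny s.toList ["consciousness", "awareness", "mind"] i)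
      = (["consciousness", "awareness", "mind"].any fun w => PySem.Str.isIn w s) :=
  pv_group_flag _ _ (by decide)

theorem pv_flag3 (s : String) :
    (List.range s.toList.length).any (fun i => pvStartsAny s.toList ["claude", "bridge", "communication"] i)
      = (["claude", "bridge", "communication"].any fun w => PySem.Str.isIn w s) :=
  pv_group_flag _ _ (by decide)

theorem pv_flag4 (s : String) :
    (List.range s.toList.length).any (fun i => pvStartsAny s.toList ["flow", "resonance", "harmonic"] i)
      = (["flow", "resonance", "harmonic"].any fun w => PySem.Str.isIn w s) :=
  pv_group_flag _ _ (by decide)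

theorem pv_flag5 (s : String) :
    (List.range s.toList.length).any (fun i => pvStartsAny s.toList ["hello", "hi", "bye", "thanks"] i)
      = (["hello", "hi", "bye", "thanks"].any fun w => PySem.Str.isIn w s) :=
  pv_group_flag _ _ (by decide)

-- the pure arithmetic of the two scoring expressions, over abstract condition values
set_option maxHeartbeats 1600000 in
theorem pv_arith (b1 b2 b3 b4 b5 c1 c2 : Bool) (p : Prop) [inst : Decidable p] :
    (let importance : Int := 5
     let importance := if b1 then importance + 3 else importance
     let importance := if b2 then importance + 2 else importance
     let importance := if b3 then importance + 2 else importance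
     let importance := if b4 then importance + 1 else importance
     let importance := if c1 then importance + 1 else importance
     let importance := if c2 then importance + 1 else importance
     let importance := if b5 then importance - 1 else importance
     let importance := if p then importance - 1 else importance
     max 1 (min 10 importance))
    = (let score : Int := 5 + (if b1 then 3 else 0) + (if b2 then 2 else 0)
         + (if b3 then 2 else 0) + (if b4 then 1 else 0) - (if b5 then 1 else 0)
       let score := if c1 then score + 1 else score
       let score := if c2 then score + 1 else score
       let score := if p then score - 1 else score
       max 1 (min 10 score)) := by
  dsimp only
  split_ifs <;> omega

-- ===== VERDICT =====
theorem calculate_memory_importance_spec : Claim_equal_calculate_memory_importance := by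
  intro um nr ctx _
  show calculate_memory_importance um nr ctx = calculate_memory_importance_alt um nr ctx
  simp only [calculate_memory_importance, calculate_memory_importance_alt]
  rw [pv_foldl_or5]
  simp only [Bool.false_or]
  rw [pv_flag1, pv_flag2, pv_flag3, pv_flag4, pv_flag5]
  exact pv_arith _ _ _ _ _ _ _ _
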